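-- pv_equiv track=rewrite | github.com/jinsoo960/advent-of-code | d14/d14.py | getSplitIndex
-- ===== SOURCE A (Python) =====
-- def getSplitIndex(arr, delim):
--     indices = []
--     start = 0
--     for i, c in enumerate(arr):
--         if c == delim:
--             indices.append((start, i))
--             start = i + 1
--     indices.append((start, len(arr)))
--     indices = list(filter(lambda x: x[0] != x[1], indices))
--     return indices
-- ===== SOURCE B (Python) =====
-- def getSplitIndex(arr, delim):
--     cuts = [i for i, c in enumerate(arr) if c == delim]
--     b = [-1] + cuts + [len(arr)]
--     segs = [(p + 1, q) for p, q in zip(b, b[1:])]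
--     return [s for s in segs if s[0] != s[1]]
-- ===== Notes on version B (the rewrite author's own statement) =====
-- stated objective: alternative
-- what changed: Replaces the accumulator-threaded scan (start variable updated in a loop) with a table-then-pairwise decomposition: compute delimiter positions first, form the boundary list [-1]+cuts+[len(arr)], and derive each segment from consecutive boundary pairs.
import Mathlib
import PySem

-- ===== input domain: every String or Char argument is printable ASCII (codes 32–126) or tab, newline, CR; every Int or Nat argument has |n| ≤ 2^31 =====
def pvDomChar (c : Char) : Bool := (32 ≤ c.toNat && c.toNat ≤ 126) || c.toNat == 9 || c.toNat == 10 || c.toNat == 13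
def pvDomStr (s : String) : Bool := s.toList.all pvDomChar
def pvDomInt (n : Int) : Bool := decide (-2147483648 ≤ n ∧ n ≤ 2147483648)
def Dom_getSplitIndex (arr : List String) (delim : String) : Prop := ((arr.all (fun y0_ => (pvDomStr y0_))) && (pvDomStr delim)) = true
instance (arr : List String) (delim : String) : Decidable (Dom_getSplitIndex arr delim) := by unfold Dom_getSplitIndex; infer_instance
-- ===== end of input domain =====

-- B replaces A's accumulator-threaded scan by a boundary-table decomposition (cut positions, then pairwise segments); alternative decomposition, same cost.

-- ===== PORT A =====
-- literal port of A: one enumerate loop threading (indices, start), trailing segment appended, then filter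
def getSplitIndex (arr : List String) (delim : String) : List (Int × Int) :=
  let r := (PySem.List.enumerate arr).foldl
    (fun (s : List (Int × Int) × Int) ic =>
      if ic.2 == delim then (s.1 ++ [(s.2, ic.1)], ic.1 + 1) else s)
    ([], 0)
  (r.1 ++ [(r.2, (arr.length : Int))]).filter (fun x => x.1 != x.2)

-- ===== PORT B =====
-- literal port of Source B: cut positions, boundary list [-1]+cuts+[len], pairwise zip, filter
def getSplitIndex_alt (arr : List String) (delim : String) : List (Int × Int) :=
  let cuts := ((PySem.List.enumerate arr).filter (fun ic => ic.2 == delim)).map (·.1)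
  let b := [(-1 : Int)] ++ cuts ++ [(arr.length : Int)]
  let segs := (b.zip b.tail).map (fun pq => (pq.1 + 1, pq.2))
  segs.filter (fun s => s.1 != s.2)

-- ===== PRECONDITION & SPEC =====
def Spec_getSplitIndex (arr : List String) (delim : String) (out : List (Int × Int)) : Prop := out = getSplitIndex_alt arr delim
instance (arr : List String) (delim : String) (out : List (Int × Int)) : Decidable (Spec_getSplitIndex arr delim out) := by unfold Spec_getSplitIndex; infer_instance

-- ===== CLAIM (what is proved, stated in full; the proofs are below) =====
def Claim_equal_getSplitIndex : Prop := ∀ (arr : List String) (delim : String), Dom_getSplitIndex arr delim → Spec_getSplitIndex arr delim (getSplitIndex arr delim)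

-- ===== LEMMAS AND PROOFS =====

/-- Segments starting at `s` cut at the positions `cs`, ending at `n` (proof-side description). -/
def segsFrom (s : Int) : List Int → Int → List (Int × Int)
  | [], n => [(s, n)]
  | c :: cs, n => (s, c) :: segsFrom (c + 1) cs n

/-- A's loop, run from any accumulator/start, produces exactly the segments of its cut positions. -/
theorem loopA_eq (delim : String) (es : List (Int × String)) :
    ∀ (acc : List (Int × Int)) (s n : Int),
    (es.foldl (fun (st : List (Int × Int) × Int) ic =>
        if ic.2 == delim then (st.1 ++ [(st.2, ic.1)], ic.1 + 1) else st) (acc, s)).1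
      ++ [((es.foldl (fun (st : List (Int × Int) × Int) ic =>
        if ic.2 == delim then (st.1 ++ [(st.2, ic.1)], ic.1 + 1) else st) (acc, s)).2, n)]
    = acc ++ segsFrom s ((es.filter (fun ic => ic.2 == delim)).map (·.1)) n := by
  induction es with
  | nil => intro acc s n; simp [segsFrom]
  | cons hd tl ih =>
    intro acc s n
    by_cases h : (hd.2 == delim) = true
    · simp only [List.foldl_cons, List.filter_cons, h, if_true]
      rw [ih]
      simp only [List.append_assoc, List.singleton_append]
      rfl
    · simp only [List.foldl_cons, List.filter_cons, h, Bool.false_eq_true, if_false]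
      rw [ih]

/-- B's pairwise zip over a boundary list is `segsFrom` of the cuts. -/
theorem zip_segs (cs : List Int) :
    ∀ (p n : Int),
    (((p :: (cs ++ [n])).zip (cs ++ [n])).map (fun pq => (pq.1 + 1, pq.2)))
    = segsFrom (p + 1) cs n := by
  induction cs with
  | nil => intro p n; simp [segsFrom]
  | cons c cs ih =>
    intro p n
    simp only [List.cons_append, List.zip_cons_cons, List.map_cons, segsFrom]
    rw [ih]

-- ===== VERDICT (by name: the statement is the Claim_ definition above) =====
theorem getSplitIndex_spec : Claim_equal_getSplitIndex := by
  intro arr delim _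
  unfold Spec_getSplitIndex getSplitIndex getSplitIndex_alt
  simp only [List.cons_append, List.tail_cons]
  rw [loopA_eq delim (PySem.List.enumerate arr) [] 0 (arr.length : Int),
      zip_segs _ (-1) (arr.length : Int)]
  norm_num
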